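-- pv_equiv track=rewrite | github.com/leroux/axi-assistant | axi/channels.py | parse_channel_topic
-- ===== SOURCE A (Python) =====
-- def parse_channel_topic(
--     topic: str | None,
-- ) -> tuple[str | None, str | None, str | None, str | None]:
--     """Parse cwd, session_id, prompt_hash, and agent_type from a channel topic."""
--     if not topic:
--         return None, None, None, None
--     cwd = None
--     session_id = None
--     prompt_hash = None
--     agent_type: str | None = None
--     for part in topic.split("|"):
--         key, _, value = part.strip().partition(": ")
--         if key == "cwd":
--             cwd = value.strip()
--         elif key == "session":
--             session_id = value.strip()
--         elif key == "prompt_hash":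
--             prompt_hash = value.strip()
--         elif key == "type":
--             agent_type = value.strip()
--     return cwd, session_id, prompt_hash, agent_type
-- ===== SOURCE B (Python) =====
-- def parse_channel_topic(topic):
--     """Parse cwd, session_id, prompt_hash, and agent_type from a channel topic."""
--     if not topic:
--         return None, None, None, None
--     parts = topic.split("|")
--
--     def last_value(key):
--         # last-duplicate-wins = first match when scanning backwards
--         for part in reversed(parts):
--             k, _, v = part.strip().partition(": ")
--             if k == key:
--                 return v.strip()
--         return None
--
--     return (last_value("cwd"), last_value("session"),
--             last_value("prompt_hash"), last_value("type"))
-- ===== Notes on version B (the rewrite author's own statement) =====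
-- stated objective: alternative
-- what changed: Replaces A's single forward fold over four mutable accumulator variables with four independent backward searches (first match over reversed parts = last-duplicate-wins), eliminating the if/elif dispatch and all loop state.
import Mathlib
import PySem

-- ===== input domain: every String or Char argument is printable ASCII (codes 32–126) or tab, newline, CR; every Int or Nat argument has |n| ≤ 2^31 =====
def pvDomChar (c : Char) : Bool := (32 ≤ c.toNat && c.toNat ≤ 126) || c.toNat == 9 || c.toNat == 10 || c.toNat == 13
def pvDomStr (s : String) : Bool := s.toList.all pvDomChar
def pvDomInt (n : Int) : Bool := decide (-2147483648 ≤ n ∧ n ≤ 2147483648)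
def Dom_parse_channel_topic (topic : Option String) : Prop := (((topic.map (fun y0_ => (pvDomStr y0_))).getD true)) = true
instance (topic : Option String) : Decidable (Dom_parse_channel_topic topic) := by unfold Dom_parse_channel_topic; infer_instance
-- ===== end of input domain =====

-- B replaces A's single forward fold over four mutable accumulators by four independent
-- backward searches (first match over the reversed parts = last-duplicate-wins); objective: alternative.

-- ===== PORT A =====
-- str.partition(sep): (before, sep, after) at the first occurrence of sep, or (s, "", "").
-- Exact: PySem.Chars.find is Python's str.find. Shared by both ports (both Pythons call .partition).
def pyPartition (s : List Char) (sep : List Char) : List Char × List Char × List Char :=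
  let i := PySem.Chars.find s sep
  if i = -1 then (s, [], [])
  else (s.take i.toNat, sep, s.drop (i.toNat + sep.length))

-- one iteration of A's for-loop: the if/elif chain updating (cwd, session_id, prompt_hash, agent_type)
def pctStepA (st : Option String × Option String × Option String × Option String) (part : String) :
    Option String × Option String × Option String × Option String :=
  let kv := pyPartition (PySem.Chars.strip part.toList) (": ".toList)
  let key := String.ofList kv.1
  let value := String.ofList (PySem.Chars.strip kv.2.2)
  if key = "cwd" then (some value, st.2.1, st.2.2.1, st.2.2.2)
  else if key = "session" then (st.1, some value, st.2.2.1, st.2.2.2)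
  else if key = "prompt_hash" then (st.1, st.2.1, some value, st.2.2.2)
  else if key = "type" then (st.1, st.2.1, st.2.2.1, some value)
  else st

def parse_channel_topic (topic : Option String) : Option String × Option String × Option String × Option String :=
  match topic with
  | none => (none, none, none, none)
  | some t =>
    if t = "" then (none, none, none, none)
    else ((PySem.Str.split? t "|").getD []).foldl pctStepA (none, none, none, none)

-- ===== PORT B =====
-- B's inner `last_value(key)` scanning `reversed(parts)`: first part whose partition key equals `key`.
def pctLastValue (key : String) : List String → Option String
  | [] => none
  | p :: rest =>
    let kv := pyPartition (PySem.Chars.strip p.toList) (": ".toList)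
    if String.ofList kv.1 = key then some (String.ofList (PySem.Chars.strip kv.2.2))
    else pctLastValue key rest

def parse_channel_topic_alt (topic : Option String) : Option String × Option String × Option String × Option String :=
  match topic with
  | none => (none, none, none, none)
  | some t =>
    if t = "" then (none, none, none, none)
    else
      let rparts := ((PySem.Str.split? t "|").getD []).reverse
      (pctLastValue "cwd" rparts, pctLastValue "session" rparts,
       pctLastValue "prompt_hash" rparts, pctLastValue "type" rparts)

-- ===== PRECONDITION & SPEC =====
def Spec_parse_channel_topic (topic : Option String) (out : Option String × Option String × Option String × Option String) : Prop := out = parse_channel_topic_alt topic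
instance (topic : Option String) (out : Option String × Option String × Option String × Option String) : Decidable (Spec_parse_channel_topic topic out) := by unfold Spec_parse_channel_topic; infer_instance

-- ===== CLAIM (what is proved, stated in full; the proofs are below) =====
def Claim_equal_parse_channel_topic : Prop := ∀ (topic : Option String), Dom_parse_channel_topic topic → Spec_parse_channel_topic topic (parse_channel_topic topic)

-- ===== LEMMAS AND PROOFS =====
theorem pctLastValue_append (key : String) (l l' : List String) :
    pctLastValue key (l ++ l') = (pctLastValue key l).or (pctLastValue key l') := by
  induction l with
  | nil => simp [pctLastValue]
  | cons p rest ih =>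
    simp only [List.cons_append, pctLastValue, ih]
    split <;> simp [Option.or]

-- Each single step of A's chain equals a one-element backward search, falling back on st.
theorem pctStep_single (st : Option String × Option String × Option String × Option String) (p : String) :
    pctStepA st p =
      ((pctLastValue "cwd" [p]).or st.1, (pctLastValue "session" [p]).or st.2.1,
       (pctLastValue "prompt_hash" [p]).or st.2.2.1, (pctLastValue "type" [p]).or st.2.2.2) := by
  simp only [pctStepA, pctLastValue]
  split_ifs with h1 h2 h3 h4 <;> simp_all [Option.some_or, Option.none_or]

-- Loop invariant: A's fold from state st equals B's backward searches, falling back on st.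
theorem pct_fold_inv (parts : List String) (st : Option String × Option String × Option String × Option String) :
    parts.foldl pctStepA st =
      ((pctLastValue "cwd" parts.reverse).or st.1,
       (pctLastValue "session" parts.reverse).or st.2.1,
       (pctLastValue "prompt_hash" parts.reverse).or st.2.2.1,
       (pctLastValue "type" parts.reverse).or st.2.2.2) := by
  induction parts generalizing st with
  | nil => simp [pctLastValue]
  | cons p rest ih =>
    simp only [List.foldl_cons, ih, pctStep_single, List.reverse_cons, pctLastValue_append,
      Option.or_assoc]

-- ===== VERDICT (by name: the statement is the Claim_ definition above) =====
theorem parse_channel_topic_spec : Claim_equal_parse_channel_topic := by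
  intro topic _
  unfold Spec_parse_channel_topic parse_channel_topic parse_channel_topic_alt
  match topic with
  | none => rfl
  | some t =>
    by_cases ht : t = ""
    · simp [ht]
    · simp [ht, pct_fold_inv, Option.or_none]
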